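-- pv_equiv track=rewrite | github.com/ssm7/FQH-Quasihole-Braiding | tools/KrylovSubspace/KrylovBuilder.py | squeeze_from_roots
-- ===== SOURCE A (Python) =====
-- def laughlin_squeezes(state, Nphi):
--     children = set()
--
--     for i in range(Nphi):
--         i0 = i
--         i1 = (i + 1) % Nphi
--         i2 = (i + 2) % Nphi
--         i3 = (i + 3) % Nphi
--
--         if ((state >> i0) & 1 and
--             not (state >> i1) & 1 and
--             not (state >> i2) & 1 and
--             (state >> i3) & 1):
--
--             new = state
--             new &= ~(1 << i0)
--             new &= ~(1 << i3)
--             new |=  (1 << i1)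
--             new |=  (1 << i2)
--             children.add(new)
--
--         if (not (state >> i0) & 1 and
--             (state >> i1) & 1 and
--             (state >> i2) & 1 and
--             not (state >> i3) & 1):
--
--             new = state
--             new |=  (1 << i0)
--             new |=  (1 << i3)
--             new &= ~(1 << i1)
--             new &= ~(1 << i2)
--             children.add(new)
--
--     return children
--
-- def squeeze_from_roots(root_states, Nphi):
--     basis = set(root_states)
--     frontier = set(root_states)
--
--     while frontier:
--         new_frontier = set()
--         for s in frontier:
--             for t in laughlin_squeezes(s, Nphi):
--                 if t not in basis:
--                     basis.add(t)
--                     new_frontier.add(t)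
--         frontier = new_frontier
--
--     return sorted(basis)
-- ===== SOURCE B (Python) =====
-- def _insort(xs, v):
--     # insert v into the sorted duplicate-free list xs, skipping it if present
--     i = 0
--     n = len(xs)
--     while i < n and xs[i] < v:
--         i += 1
--     if i < n and xs[i] == v:
--         return xs
--     return xs[:i] + [v] + xs[i:]
--
--
-- def squeeze_from_roots(root_states, Nphi):
--     # Fixpoint over a sorted duplicate-free list: each round expands every
--     # accumulated state in place (children computed inline as one masked
--     # expression, inserted in sorted position), stopping when the length
--     # stops growing; no sets, no frontier, no final sort.
--     basis = []
--     for r in root_states: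
--         basis = _insort(basis, r)
--     while True:
--         n0 = len(basis)
--         for s in list(basis):
--             for i in range(Nphi):
--                 i1 = (i + 1) % Nphi
--                 i2 = (i + 2) % Nphi
--                 i3 = (i + 3) % Nphi
--                 b0 = (s >> i) & 1
--                 b1 = (s >> i1) & 1
--                 b2 = (s >> i2) & 1
--                 b3 = (s >> i3) & 1
--                 if b0 and not b1 and not b2 and b3:
--                     child = ((s & ~(1 << i)) & ~(1 << i3)) | (1 << i1) | (1 << i2)
--                     basis = _insort(basis, child)
--                 if not b0 and b1 and b2 and not b3:
--                     child = ((s | (1 << i)) | (1 << i3)) & ~(1 << i1) & ~(1 << i2)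
--                     basis = _insort(basis, child)
--         if len(basis) == n0:
--             return basis
-- ===== Notes on version B (the rewrite author's own statement) =====
-- stated objective: alternative
-- what changed: Replaces the layered BFS over hash sets (basis + frontier + new_frontier with per-neighbour membership gating and a final sort) by a fixpoint loop over a single sorted duplicate-free list: each round expands every accumulated state, children computed inline as one masked bit expression and placed by sorted insertion, stopping when the list length stops growing; the result is returned already sorted.
import Mathlib
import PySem

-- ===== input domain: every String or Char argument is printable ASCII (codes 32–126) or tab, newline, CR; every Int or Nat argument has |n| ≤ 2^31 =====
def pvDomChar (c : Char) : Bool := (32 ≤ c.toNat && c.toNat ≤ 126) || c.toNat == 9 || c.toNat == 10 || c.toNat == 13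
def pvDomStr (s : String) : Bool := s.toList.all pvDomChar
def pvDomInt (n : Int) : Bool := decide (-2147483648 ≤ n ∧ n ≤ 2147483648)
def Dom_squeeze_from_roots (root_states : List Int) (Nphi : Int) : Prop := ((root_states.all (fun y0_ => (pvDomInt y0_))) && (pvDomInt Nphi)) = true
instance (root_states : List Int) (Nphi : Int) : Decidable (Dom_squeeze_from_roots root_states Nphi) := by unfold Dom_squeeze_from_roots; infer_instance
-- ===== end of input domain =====

-- B replaces A's layered BFS over sets (basis + frontier + new_frontier, final sort) by a
-- fixpoint loop over a single sorted duplicate-free list, children computed inline as one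
-- masked expression and placed by sorted insertion, stopping when the length stops growing;
-- objective: alternative control shape and data structure, not speed.

-- ===== PORT A =====

-- shared helper (both Pythons test bits with '(s >> i) & 1'): bit test ≠ 0.
-- Shift amounts are i ∈ range(Nphi) and (i+k) % Nphi with Nphi ≥ 1, hence ≥ 0, so .toNat is exact.
def pvBit (state : Int) (i : Int) : Bool := PySem.Int.band (state >>> i.toNat) 1 ≠ 0

def laughlin_squeezes (state : Int) (Nphi : Int) : PySem.Set Int :=
  (PySem.List.pyRange 0 Nphi 1).foldl (fun children i =>
    let i0 := i
    let i1 := PySem.Int.mod (i + 1) Nphi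
    let i2 := PySem.Int.mod (i + 2) Nphi
    let i3 := PySem.Int.mod (i + 3) Nphi
    let children :=
      if pvBit state i0 && !pvBit state i1 && !pvBit state i2 && pvBit state i3 then
        let new := state
        let new := PySem.Int.band new (Int.not (1 <<< i0.toNat))
        let new := PySem.Int.band new (Int.not (1 <<< i3.toNat))
        let new := PySem.Int.bor new (1 <<< i1.toNat)
        let new := PySem.Int.bor new (1 <<< i2.toNat)
        PySem.Set.add children new
      else children
    if !pvBit state i0 && pvBit state i1 && pvBit state i2 && !pvBit state i3 then
      let new := state
      let new := PySem.Int.bor new (1 <<< i0.toNat)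
      let new := PySem.Int.bor new (1 <<< i3.toNat)
      let new := PySem.Int.band new (Int.not (1 <<< i1.toNat))
      let new := PySem.Int.band new (Int.not (1 <<< i2.toNat))
      PySem.Set.add children new
    else children) PySem.Set.empty

-- fuel bound for the while-loops (erased-by-value guard, not an algorithm change): every
-- round before the last adds at least one state, and all reachable states agree with some
-- root above bit Nphi, so at most len(root_states)·2^Nphi rounds can add a state.
def pvFuel (root_states : List Int) (Nphi : Int) : Nat :=
  root_states.length * 2 ^ Nphi.toNat + 1

-- body of A's 'for s in frontier: for t in laughlin_squeezes(s, Nphi): if t not in basis: …'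
def pvInnerA (Nphi : Int) (st : PySem.Set Int × PySem.Set Int) (s : Int) :
    PySem.Set Int × PySem.Set Int :=
  (laughlin_squeezes s Nphi).foldl
    (fun st t =>
      if PySem.Set.contains st.1 t then st
      else (PySem.Set.add st.1 t, PySem.Set.add st.2 t)) st

-- A's 'while frontier:' loop
def pvLoopA (Nphi : Int) (fuel : Nat) (basis frontier : PySem.Set Int) : PySem.Set Int :=
  match fuel with
  | 0 => basis
  | fuel + 1 =>
    if frontier.isEmpty then basis
    else
      let p := frontier.foldl (pvInnerA Nphi) (basis, PySem.Set.empty)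
      pvLoopA Nphi fuel p.1 p.2

def squeeze_from_roots (root_states : List Int) (Nphi : Int) : List Int :=
  PySem.List.sorted
    (pvLoopA Nphi (pvFuel root_states Nphi)
      (PySem.Set.ofList root_states) (PySem.Set.ofList root_states))
    (fun x => x) false

-- ===== PORT B =====

-- Source B's _insort: insert v into the sorted duplicate-free list, skipping it if present
def pvInsort (xs : List Int) (v : Int) : List Int :=
  match xs with
  | [] => [v]
  | x :: rest =>
    if x < v then x :: pvInsort rest v
    else if x == v then x :: rest
    else v :: x :: rest

-- body of Source B's 'for i in range(Nphi):' (children as single masked expressions, insorted)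
def pvBodyB (Nphi : Int) (s : Int) (basis : List Int) (i : Int) : List Int :=
  let i1 := PySem.Int.mod (i + 1) Nphi
  let i2 := PySem.Int.mod (i + 2) Nphi
  let i3 := PySem.Int.mod (i + 3) Nphi
  let basis :=
    if pvBit s i && !pvBit s i1 && !pvBit s i2 && pvBit s i3 then
      pvInsort basis
        (PySem.Int.bor
          (PySem.Int.bor
            (PySem.Int.band (PySem.Int.band s (Int.not (1 <<< i.toNat)))
              (Int.not (1 <<< i3.toNat)))
            (1 <<< i1.toNat))
          (1 <<< i2.toNat))
    else basis
  if !pvBit s i && pvBit s i1 && pvBit s i2 && !pvBit s i3 then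
    pvInsort basis
      (PySem.Int.band
        (PySem.Int.band (PySem.Int.bor (PySem.Int.bor s (1 <<< i.toNat)) (1 <<< i3.toNat))
          (Int.not (1 <<< i1.toNat)))
        (Int.not (1 <<< i2.toNat)))
  else basis

-- one round of Source B: 'for s in list(basis): for i in range(Nphi): …'
def pvRoundB (Nphi : Int) (basis : List Int) : List Int :=
  basis.foldl (fun acc s => (PySem.List.pyRange 0 Nphi 1).foldl (pvBodyB Nphi s) acc) basis

-- Source B's 'while True:' loop (same fuel guard as A's loop)
def pvLoopB (Nphi : Int) (fuel : Nat) (basis : List Int) : List Int :=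
  match fuel with
  | 0 => basis
  | fuel + 1 =>
    let n0 := basis.length
    let basis' := pvRoundB Nphi basis
    if basis'.length == n0 then basis' else pvLoopB Nphi fuel basis'

def squeeze_from_roots_alt (root_states : List Int) (Nphi : Int) : List Int :=
  pvLoopB Nphi (pvFuel root_states Nphi) (root_states.foldl pvInsort [])

-- ===== PRECONDITION & SPEC =====
def Spec_squeeze_from_roots (root_states : List Int) (Nphi : Int) (out : List Int) : Prop := out = squeeze_from_roots_alt root_states Nphi
instance (root_states : List Int) (Nphi : Int) (out : List Int) : Decidable (Spec_squeeze_from_roots root_states Nphi out) := by unfold Spec_squeeze_from_roots; infer_instance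

-- ===== CLAIM (what is proved, stated in full; the proofs are below) =====
def Claim_equal_squeeze_from_roots : Prop := ∀ (root_states : List Int) (Nphi : Int), Dom_squeeze_from_roots root_states Nphi → Spec_squeeze_from_roots root_states Nphi (squeeze_from_roots root_states Nphi)

-- ===== LEMMAS AND PROOFS =====

-- the two child states produced at shift i (used only in the proofs)
def pvNew1 (Nphi s i : Int) : Int :=
  PySem.Int.bor
    (PySem.Int.bor
      (PySem.Int.band (PySem.Int.band s (Int.not (1 <<< i.toNat)))
        (Int.not (1 <<< (PySem.Int.mod (i + 3) Nphi).toNat)))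
      (1 <<< (PySem.Int.mod (i + 1) Nphi).toNat))
    (1 <<< (PySem.Int.mod (i + 2) Nphi).toNat)

def pvNew2 (Nphi s i : Int) : Int :=
  PySem.Int.band
    (PySem.Int.band
      (PySem.Int.bor (PySem.Int.bor s (1 <<< i.toNat))
        (1 <<< (PySem.Int.mod (i + 3) Nphi).toNat))
      (Int.not (1 <<< (PySem.Int.mod (i + 1) Nphi).toNat)))
    (Int.not (1 <<< (PySem.Int.mod (i + 2) Nphi).toNat))

def pvCond1 (Nphi s i : Int) : Bool :=
  pvBit s i && !pvBit s (PySem.Int.mod (i + 1) Nphi) &&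
    !pvBit s (PySem.Int.mod (i + 2) Nphi) && pvBit s (PySem.Int.mod (i + 3) Nphi)

def pvCond2 (Nphi s i : Int) : Bool :=
  !pvBit s i && pvBit s (PySem.Int.mod (i + 1) Nphi) &&
    pvBit s (PySem.Int.mod (i + 2) Nphi) && !pvBit s (PySem.Int.mod (i + 3) Nphi)

-- 'y is a child produced at shift i'
def pvP (Nphi s i y : Int) : Prop :=
  (pvCond1 Nphi s i = true ∧ y = pvNew1 Nphi s i) ∨
  (pvCond2 Nphi s i = true ∧ y = pvNew2 Nphi s i)

-- generic membership through a foldl whose step adds exactly the P-elements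
theorem pvFoldMem {α : Type} (L : List α) (f : List Int → α → List Int) (P : α → Int → Prop)
    (hf : ∀ acc a y, y ∈ f acc a ↔ y ∈ acc ∨ P a y) :
    ∀ init y, y ∈ L.foldl f init ↔ y ∈ init ∨ ∃ a ∈ L, P a y := by
  induction L with
  | nil => intro init y; simp
  | cons a L ih =>
    intro init y
    simp only [List.foldl_cons]
    rw [ih, hf]
    simp only [List.mem_cons]
    constructor
    · rintro ((h | h) | ⟨b, hb, h⟩)
      · exact Or.inl h
      · exact Or.inr ⟨a, Or.inl rfl, h⟩
      · exact Or.inr ⟨b, Or.inr hb, h⟩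
    · rintro (h | ⟨b, (rfl | hb), h⟩)
      · exact Or.inl (Or.inl h)
      · exact Or.inl (Or.inr h)
      · exact Or.inr ⟨b, hb, h⟩

-- generic sortedness through a foldl whose step preserves it
theorem pvFoldSorted {α : Type} (L : List α) (f : List Int → α → List Int)
    (hf : ∀ acc a, acc.Pairwise (· < ·) → (f acc a).Pairwise (· < ·)) :
    ∀ init : List Int, init.Pairwise (· < ·) → (L.foldl f init).Pairwise (· < ·) := by
  induction L with
  | nil => intro init h; exact h
  | cons a L ih => intro init h; exact ih (f init a) (hf init a h)

theorem pvInsort_mem (xs : List Int) (v y : Int) :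
    y ∈ pvInsort xs v ↔ y ∈ xs ∨ y = v := by
  induction xs with
  | nil => simp [pvInsort]
  | cons x rest ih =>
    unfold pvInsort
    split_ifs with h1 h2
    · simp only [List.mem_cons, ih]; tauto
    · have : x = v := by simpa using h2
      subst this
      simp only [List.mem_cons]; tauto
    · simp only [List.mem_cons]; tauto

theorem pvInsort_sorted (xs : List Int) (v : Int) (h : xs.Pairwise (· < ·)) :
    (pvInsort xs v).Pairwise (· < ·) := by
  induction xs with
  | nil => simp [pvInsort]
  | cons x rest ih =>
    rw [List.pairwise_cons] at h
    unfold pvInsort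
    split_ifs with h1 h2
    · rw [List.pairwise_cons]
      refine ⟨fun y hy => ?_, ih h.2⟩
      rcases (pvInsort_mem rest v y).mp hy with hy | rfl
      · exact h.1 y hy
      · exact h1
    · exact List.pairwise_cons.mpr h
    · have hvx : v < x := by
        have : ¬ x = v := by simpa using h2
        omega
      rw [List.pairwise_cons]
      refine ⟨fun y hy => ?_, List.pairwise_cons.mpr h⟩
      rcases List.mem_cons.mp hy with rfl | hy
      · exact hvx
      · exact lt_trans hvx (h.1 y hy)

-- members of A's neighbour set
theorem pvLaughlin_mem (state Nphi y : Int) :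
    y ∈ laughlin_squeezes state Nphi ↔
      ∃ i ∈ PySem.List.pyRange 0 Nphi 1, pvP Nphi state i y := by
  unfold laughlin_squeezes
  rw [pvFoldMem _ _ (pvP Nphi state)]
  · simp [PySem.Set.empty]
  · intro acc i z
    simp only [pvP, pvCond1, pvCond2, pvNew1, pvNew2]
    split_ifs with h1 h2 h2 <;>
      simp_all [PySem.Set.mem_add]

-- members of B's inner loop over range(Nphi)
theorem pvBodyB_fold_mem (Nphi s : Int) (acc : List Int) (y : Int) :
    y ∈ (PySem.List.pyRange 0 Nphi 1).foldl (pvBodyB Nphi s) acc ↔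
      y ∈ acc ∨ ∃ i ∈ PySem.List.pyRange 0 Nphi 1, pvP Nphi s i y := by
  rw [pvFoldMem _ _ (pvP Nphi s)]
  intro a i z
  simp only [pvBodyB, pvP, pvCond1, pvCond2, pvNew1, pvNew2]
  split_ifs with h1 h2 h2 <;>
    simp_all [pvInsort_mem]

-- 'x is a squeeze-child of some element of ss'
def pvE (Nphi : Int) (ss : List Int) (x : Int) : Prop :=
  ∃ s ∈ ss, x ∈ laughlin_squeezes s Nphi

theorem pvE_cons (Nphi : Int) (s : Int) (ss : List Int) (x : Int) :
    pvE Nphi (s :: ss) x ↔ x ∈ laughlin_squeezes s Nphi ∨ pvE Nphi ss x := by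
  unfold pvE
  simp only [List.mem_cons]
  constructor
  · rintro ⟨t, (rfl | ht), hx⟩
    · exact Or.inl hx
    · exact Or.inr ⟨t, ht, hx⟩
  · rintro (hx | ⟨t, ht, hx⟩)
    · exact ⟨s, Or.inl rfl, hx⟩
    · exact ⟨t, Or.inr ht, hx⟩

-- members of B's whole round
theorem pvRoundB_mem (Nphi : Int) (basis : List Int) (y : Int) :
    y ∈ pvRoundB Nphi basis ↔ y ∈ basis ∨ pvE Nphi basis y := by
  unfold pvRoundB
  have hf : ∀ (acc : List Int) (s z : Int),
      z ∈ (PySem.List.pyRange 0 Nphi 1).foldl (pvBodyB Nphi s) acc ↔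
        z ∈ acc ∨ z ∈ laughlin_squeezes s Nphi := by
    intro acc s z
    rw [pvBodyB_fold_mem, pvLaughlin_mem]
  rw [pvFoldMem _ _ (fun s z => z ∈ laughlin_squeezes s Nphi) hf]
  unfold pvE; tauto

-- B's round keeps the list sorted
theorem pvRoundB_sorted (Nphi : Int) (basis : List Int) (h : basis.Pairwise (· < ·)) :
    (pvRoundB Nphi basis).Pairwise (· < ·) := by
  unfold pvRoundB
  apply pvFoldSorted _ _ _ _ h
  intro acc s hacc
  apply pvFoldSorted _ _ _ _ hacc
  intro a i ha
  simp only [pvBodyB]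
  split_ifs <;> first
    | exact ha
    | exact pvInsort_sorted _ _ ha
    | exact pvInsort_sorted _ _ (pvInsort_sorted _ _ ha)

-- equal length + inclusion + no duplicates gives equal membership
theorem pvSameMem_of_len (xs ys : List Int) (hx : xs.Nodup) (_hy : ys.Nodup)
    (hsub : ∀ x ∈ xs, x ∈ ys) (hlen : ys.length = xs.length) :
    ∀ x, x ∈ ys ↔ x ∈ xs := by
  have hperm : xs.Perm ys :=
    (List.Nodup.subperm hx (fun a ha => hsub a ha)).perm_of_length_le (le_of_eq hlen)
  exact fun x => ⟨fun h => hperm.mem_iff.mpr h, fun h => hperm.mem_iff.mp h⟩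

-- membership after the inner fold of pvInnerA over an arbitrary child list
theorem pvInnerFold_mem (ts : List Int) :
    ∀ (b nf : PySem.Set Int) (x : Int),
      (x ∈ (ts.foldl (fun st t =>
              if PySem.Set.contains st.1 t then st
              else (PySem.Set.add st.1 t, PySem.Set.add st.2 t))
            ((b, nf) : PySem.Set Int × PySem.Set Int)).1
        ↔ x ∈ b ∨ x ∈ ts) ∧
      (x ∈ (ts.foldl (fun st t =>
              if PySem.Set.contains st.1 t then st
              else (PySem.Set.add st.1 t, PySem.Set.add st.2 t))
            ((b, nf) : PySem.Set Int × PySem.Set Int)).2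
        ↔ x ∈ nf ∨ (x ∈ ts ∧ x ∉ b)) := by
  induction ts with
  | nil => intro b nf x; simp
  | cons t ts ih =>
    intro b nf x
    simp only [List.foldl_cons]
    by_cases ht : t ∈ b
    · rw [if_pos ((PySem.Set.contains_iff b t).mpr ht)]
      obtain ⟨h1, h2⟩ := ih b nf x
      constructor
      · rw [h1]
        simp only [List.mem_cons]
        constructor
        · rintro (h | h)
          · exact Or.inl h
          · exact Or.inr (Or.inr h)
        · rintro (h | rfl | h)
          · exact Or.inl h
          · exact Or.inl ht
          · exact Or.inr h
      · rw [h2]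
        simp only [List.mem_cons]
        constructor
        · rintro (h | ⟨h, hnb⟩)
          · exact Or.inl h
          · exact Or.inr ⟨Or.inr h, hnb⟩
        · rintro (h | ⟨(rfl | h), hnb⟩)
          · exact Or.inl h
          · exact absurd ht hnb
          · exact Or.inr ⟨h, hnb⟩
    · rw [if_neg (fun hc => ht ((PySem.Set.contains_iff b t).mp hc))]
      obtain ⟨h1, h2⟩ := ih (PySem.Set.add b t) (PySem.Set.add nf t) x
      constructor
      · rw [h1, PySem.Set.mem_add]
        simp only [List.mem_cons]
        constructor
        · rintro ((h | rfl) | h)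
          · exact Or.inl h
          · exact Or.inr (Or.inl rfl)
          · exact Or.inr (Or.inr h)
        · rintro (h | rfl | h)
          · exact Or.inl (Or.inl h)
          · exact Or.inl (Or.inr rfl)
          · exact Or.inr h
      · rw [h2, PySem.Set.mem_add, PySem.Set.mem_add]
        simp only [List.mem_cons]
        constructor
        · rintro ((h | rfl) | ⟨h, hnb⟩)
          · exact Or.inl h
          · exact Or.inr ⟨Or.inl rfl, ht⟩
          · exact Or.inr ⟨Or.inr h, fun hb => hnb (Or.inl hb)⟩
        · rintro (h | ⟨(rfl | h), hnb⟩)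
          · exact Or.inl (Or.inl h)
          · exact Or.inl (Or.inr rfl)
          · by_cases hxt : x = t
            · exact Or.inl (Or.inr hxt)
            · exact Or.inr ⟨h, fun hb => hb.elim hnb hxt⟩

-- nodup is preserved by the inner fold
theorem pvInnerFold_nodup (ts : List Int) :
    ∀ (b nf : PySem.Set Int), b.Nodup → nf.Nodup →
      (ts.foldl (fun st t =>
          if PySem.Set.contains st.1 t then st
          else (PySem.Set.add st.1 t, PySem.Set.add st.2 t))
        ((b, nf) : PySem.Set Int × PySem.Set Int)).1.Nodup ∧
      (ts.foldl (fun st t =>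
          if PySem.Set.contains st.1 t then st
          else (PySem.Set.add st.1 t, PySem.Set.add st.2 t))
        ((b, nf) : PySem.Set Int × PySem.Set Int)).2.Nodup := by
  induction ts with
  | nil => intro b nf hb hnf; exact ⟨hb, hnf⟩
  | cons t ts ih =>
    intro b nf hb hnf
    by_cases ht : PySem.Set.contains b t = true
    · simp only [List.foldl_cons, ht, if_pos]; exact ih b nf hb hnf
    · simp only [List.foldl_cons, ht]
      exact ih _ _ (PySem.Set.nodup_add b t hb) (PySem.Set.nodup_add nf t hnf)

-- membership after A's whole round (outer fold over the frontier)
theorem pvRound_mem (Nphi : Int) (ss : List Int) :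
    ∀ (b nf : PySem.Set Int) (x : Int),
      (x ∈ (ss.foldl (pvInnerA Nphi) (b, nf)).1 ↔ x ∈ b ∨ pvE Nphi ss x) ∧
      (x ∈ (ss.foldl (pvInnerA Nphi) (b, nf)).2 ↔ x ∈ nf ∨ (pvE Nphi ss x ∧ x ∉ b)) := by
  induction ss with
  | nil => intro b nf x; simp [pvE]
  | cons s ss ih =>
    intro b nf x
    simp only [List.foldl_cons]
    have hinner := pvInnerFold_mem (laughlin_squeezes s Nphi) b nf
    have hA : pvInnerA Nphi (b, nf) s =
        ((laughlin_squeezes s Nphi).foldl (fun st t =>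
          if PySem.Set.contains st.1 t then st
          else (PySem.Set.add st.1 t, PySem.Set.add st.2 t)) (b, nf)) := rfl
    rw [hA]
    set p := (laughlin_squeezes s Nphi).foldl (fun st t =>
          if PySem.Set.contains st.1 t then st
          else (PySem.Set.add st.1 t, PySem.Set.add st.2 t)) ((b, nf) : PySem.Set Int × PySem.Set Int) with hp
    have hps : p = (p.1, p.2) := rfl
    rw [hps]
    obtain ⟨h1, h2⟩ := ih p.1 p.2 x
    have hb1 := (hinner x).1
    have hb2 := (hinner x).2
    constructor
    · rw [h1, hb1, pvE_cons]
      constructor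
      · rintro ((h | h) | h)
        · exact Or.inl h
        · exact Or.inr (Or.inl h)
        · exact Or.inr (Or.inr h)
      · rintro (h | h | h)
        · exact Or.inl (Or.inl h)
        · exact Or.inl (Or.inr h)
        · exact Or.inr h
    · rw [h2, hb2, hb1, pvE_cons]
      constructor
      · rintro ((h | ⟨h, hnb⟩) | ⟨hE, hnb⟩)
        · exact Or.inl h
        · exact Or.inr ⟨Or.inl h, hnb⟩
        · exact Or.inr ⟨Or.inr hE, fun hb => hnb (Or.inl hb)⟩
      · rintro (h | ⟨(h | hE), hnb⟩)
        · exact Or.inl (Or.inl h)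
        · exact Or.inl (Or.inr ⟨h, hnb⟩)
        · by_cases hs : x ∈ laughlin_squeezes s Nphi
          · exact Or.inl (Or.inr ⟨hs, hnb⟩)
          · exact Or.inr ⟨hE, fun hb => hb.elim hnb hs⟩

-- nodup after A's whole round
theorem pvRound_nodup (Nphi : Int) (ss : List Int) :
    ∀ (b nf : PySem.Set Int), b.Nodup → nf.Nodup →
      (ss.foldl (pvInnerA Nphi) (b, nf)).1.Nodup ∧
      (ss.foldl (pvInnerA Nphi) (b, nf)).2.Nodup := by
  induction ss with
  | nil => intro b nf hb hnf; exact ⟨hb, hnf⟩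
  | cons s ss ih =>
    intro b nf hb hnf
    simp only [List.foldl_cons]
    have h := pvInnerFold_nodup (laughlin_squeezes s Nphi) b nf hb hnf
    have hA : pvInnerA Nphi (b, nf) s =
        ((laughlin_squeezes s Nphi).foldl (fun st t =>
          if PySem.Set.contains st.1 t then st
          else (PySem.Set.add st.1 t, PySem.Set.add st.2 t)) (b, nf)) := rfl
    rw [hA]
    set p := (laughlin_squeezes s Nphi).foldl (fun st t =>
          if PySem.Set.contains st.1 t then st
          else (PySem.Set.add st.1 t, PySem.Set.add st.2 t)) ((b, nf) : PySem.Set Int × PySem.Set Int)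
    have hps : p = (p.1, p.2) := rfl
    rw [hps]
    exact ih p.1 p.2 h.1 h.2

-- A's loop with an empty frontier returns its basis at once
theorem pvLoopA_nil (Nphi : Int) (fuel : Nat) (b : PySem.Set Int) :
    pvLoopA Nphi fuel b ([] : PySem.Set Int) = b := by
  cases fuel <;> simp [pvLoopA]

-- Main simulation: under the BFS invariant, A's layered loop and B's sorted-list fixpoint
-- loop return lists with the same members; A's is Nodup, B's is sorted.
theorem pvLoop_eq (Nphi : Int) (fuel : Nat) :
    ∀ (bA f : PySem.Set Int) (bB : List Int),
      bA.Nodup → bB.Pairwise (· < ·) →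
      (∀ x, x ∈ bA ↔ x ∈ bB) →
      (∀ x ∈ f, x ∈ bA) →
      (∀ s ∈ bA, s ∉ f → ∀ t ∈ laughlin_squeezes s Nphi, t ∈ bA) →
      (∀ x, x ∈ pvLoopA Nphi fuel bA f ↔ x ∈ pvLoopB Nphi fuel bB) ∧
      (pvLoopA Nphi fuel bA f).Nodup ∧ (pvLoopB Nphi fuel bB).Pairwise (· < ·) := by
  induction fuel with
  | zero => intro bA f bB hA hB hmem _ _; exact ⟨hmem, hA, hB⟩
  | succ n ih =>
    intro bA f bB hA hB hmem hsub hinv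
    have hBnodup : bB.Nodup := hB.imp (fun h => ne_of_lt h)
    have hB' : (pvRoundB Nphi bB).Pairwise (· < ·) := pvRoundB_sorted Nphi bB hB
    have hB'nodup : (pvRoundB Nphi bB).Nodup := hB'.imp (fun h => ne_of_lt h)
    -- members of B's round = bA ∪ children(f)
    have hnewmem : ∀ x, x ∈ pvRoundB Nphi bB ↔ x ∈ bA ∨ pvE Nphi f x := by
      intro x
      rw [pvRoundB_mem]
      constructor
      · rintro (h | ⟨s, hs, hx⟩)
        · exact Or.inl ((hmem x).mpr h)
        · have hsA : s ∈ bA := (hmem s).mpr hs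
          by_cases hsf : s ∈ f
          · exact Or.inr ⟨s, hsf, hx⟩
          · exact Or.inl (hinv s hsA hsf x hx)
      · rintro (h | ⟨s, hs, hx⟩)
        · exact Or.inl ((hmem x).mp h)
        · exact Or.inr ⟨s, (hmem s).mp (hsub s hs), hx⟩
    have hgrow : ∀ x ∈ bB, x ∈ pvRoundB Nphi bB := fun x hx =>
      (pvRoundB_mem Nphi bB x).mpr (Or.inl hx)
    by_cases hfe : f.isEmpty
    · -- A returns bA at once; B's round adds nothing, so the length check stops it
      have hfnil : f = [] := List.isEmpty_iff.mp hfe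
      subst hfnil
      have hEnil : ∀ x, ¬ pvE Nphi ([] : List Int) x := by rintro x ⟨s, hs, _⟩; cases hs
      have hsame : ∀ x, x ∈ pvRoundB Nphi bB ↔ x ∈ bB := by
        intro x
        rw [hnewmem x]
        constructor
        · rintro (h | h)
          · exact (hmem x).mp h
          · exact absurd h (hEnil x)
        · intro h; exact Or.inl ((hmem x).mpr h)
      have hperm : (pvRoundB Nphi bB).Perm bB :=
        (List.perm_ext_iff_of_nodup hB'nodup hBnodup).mpr hsame
      have hlen : ((pvRoundB Nphi bB).length == bB.length) = true := by
        simp [hperm.length_eq]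
      simp only [pvLoopA, pvLoopB, List.isEmpty_nil, if_pos, hlen]
      exact ⟨fun x => (hmem x).trans (hsame x).symm, hA, hB'⟩
    · -- A does a round
      simp only [pvLoopA, pvLoopB, hfe, Bool.false_eq_true, if_false]
      set p := f.foldl (pvInnerA Nphi) (bA, PySem.Set.empty) with hp
      have hpmem := pvRound_mem Nphi f bA PySem.Set.empty
      have hpnodup := pvRound_nodup Nphi f bA PySem.Set.empty hA List.nodup_nil
      rw [← hp] at hpmem hpnodup
      have hp1 : ∀ x, x ∈ p.1 ↔ x ∈ bA ∨ pvE Nphi f x := fun x => (hpmem x).1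
      have hp2 : ∀ x, x ∈ p.2 ↔ pvE Nphi f x ∧ x ∉ bA := by
        intro x
        rw [(hpmem x).2]
        simp [PySem.Set.empty]
      have hp1new : ∀ x, x ∈ p.1 ↔ x ∈ pvRoundB Nphi bB := by
        intro x; rw [hp1, hnewmem]
      by_cases hlen : ((pvRoundB Nphi bB).length == bB.length) = true
      · -- B stops; nothing was new, so A's new frontier is empty
        rw [if_pos hlen]
        have hsame : ∀ x, x ∈ pvRoundB Nphi bB ↔ x ∈ bB :=
          pvSameMem_of_len bB (pvRoundB Nphi bB) hBnodup hB'nodup hgrow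
            (by simpa using hlen)
        have hp2nil : p.2 = [] := by
          apply List.eq_nil_iff_forall_not_mem.mpr
          intro x hx
          obtain ⟨hE, hnb⟩ := (hp2 x).mp hx
          have hxr : x ∈ pvRoundB Nphi bB := (hnewmem x).mpr (Or.inr hE)
          exact hnb ((hmem x).mpr ((hsame x).mp hxr))
        rw [hp2nil, pvLoopA_nil]
        exact ⟨hp1new, hpnodup.1, hB'⟩
      · -- both recurse; re-establish the invariant
        rw [if_neg hlen]
        apply ih p.1 p.2 (pvRoundB Nphi bB) hpnodup.1 hB'
        · exact hp1new
        · intro x hx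
          obtain ⟨hE, _⟩ := (hp2 x).mp hx
          exact (hp1 x).mpr (Or.inr hE)
        · intro s hs hsnf t ht
          by_cases hsbA : s ∈ bA
          · by_cases hsf : s ∈ f
            · exact (hp1 t).mpr (Or.inr ⟨s, hsf, ht⟩)
            · exact (hp1 t).mpr (Or.inl (hinv s hsbA hsf t ht))
          · rcases (hp1 s).mp hs with h | hE
            · exact absurd h hsbA
            · exact absurd ((hp2 s).mpr ⟨hE, hsbA⟩) hsnf

-- ===== VERDICT (by name: the statement is the Claim_ definition above) =====
theorem squeeze_from_roots_spec : Claim_equal_squeeze_from_roots := by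
  intro root_states Nphi _
  unfold Spec_squeeze_from_roots squeeze_from_roots squeeze_from_roots_alt
  have hBsorted : (root_states.foldl pvInsort []).Pairwise (· < ·) :=
    pvFoldSorted root_states pvInsort (fun acc a h => pvInsort_sorted acc a h) [] (by simp)
  have hBmem : ∀ x, x ∈ root_states.foldl pvInsort [] ↔ x ∈ root_states := by
    intro x
    rw [pvFoldMem root_states pvInsort (fun a y => y = a) (fun acc a y => pvInsort_mem acc a y)]
    simp
  obtain ⟨hmem, hnA, hnB⟩ :=
    pvLoop_eq Nphi (pvFuel root_states Nphi)
      (PySem.Set.ofList root_states) (PySem.Set.ofList root_states)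
      (root_states.foldl pvInsort [])
      (PySem.Set.nodup_ofList root_states) hBsorted
      (fun x => by rw [PySem.Set.mem_ofList, hBmem])
      (fun _ h => h)
      (fun s hsA hsf t _ => absurd hsA hsf)
  exact PySem.List.sorted_eq_of_perm_of_pairwise_lt _ _ (fun x => x)
    ((List.perm_ext_iff_of_nodup (hnB.imp (fun h => ne_of_lt h)) hnA).mpr
      (fun x => (hmem x).symm))
    hnB
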